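-- pv_equiv track=rewrite | github.com/datduyng/advent-code-2018 | 05_alchemical_reduction.py | alchemReduction
-- ===== SOURCE A (Python) =====
-- def alchemReduction(polymers):
--     result =""
--     for c in polymers:
--         if(len(result)==0):
--             result += str(c)
--         elif( ((result[-1].isupper() and c.islower()) or
--                (result[-1].islower() and c.isupper())) and
--                 result[-1].lower() == c.lower()):#end of the polymers
--             result = result[:-1] #remove the last char: this is so inefficient though
--             continue
--         else:
--             result += str(c)
--     return result
-- ===== SOURCE B (Python) =====
-- def alchemReduction(polymers):
--     # Divide and conquer: reduce each half independently, then cancel reacting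
--     # pairs across the boundary of the two (already fully reduced) halves.
--     def reduce(s):
--         n = len(s)
--         if n <= 1:
--             return list(s)
--         left = reduce(s[: n // 2])
--         right = reduce(s[n // 2 :])
--         i = len(left)
--         j = 0
--         while (i > 0 and j < len(right)
--                and left[i - 1] != right[j]
--                and left[i - 1].lower() == right[j].lower()):
--             i -= 1
--             j += 1
--         return left[:i] + right[j:]
--     return "".join(reduce(polymers))
-- ===== Notes on version B (the rewrite author's own statement) =====
-- stated objective: alternative
-- what changed: Replaced A's single left-to-right pass maintaining a growing/shrinking result string by a divide-and-conquer reduction: each half of the string is reduced independently and the two fully-reduced halves are joined by cancelling reacting pairs across the boundary; correctness rests on the reduction's unique normal form.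
import Mathlib
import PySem

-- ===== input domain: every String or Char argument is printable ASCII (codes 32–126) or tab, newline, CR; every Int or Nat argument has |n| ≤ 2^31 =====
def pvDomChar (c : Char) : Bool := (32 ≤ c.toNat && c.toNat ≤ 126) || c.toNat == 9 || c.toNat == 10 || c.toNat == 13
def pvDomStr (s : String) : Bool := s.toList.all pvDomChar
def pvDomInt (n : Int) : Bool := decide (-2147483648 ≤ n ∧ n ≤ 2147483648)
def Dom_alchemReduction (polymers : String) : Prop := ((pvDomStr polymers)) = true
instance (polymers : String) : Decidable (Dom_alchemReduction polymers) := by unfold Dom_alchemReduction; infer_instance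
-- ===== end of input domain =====

-- B replaces A's single pass over the string by a divide-and-conquer reduction (reduce
-- each half, then cancel reacting pairs across the boundary); same result, different algorithm.

-- ===== PORT A =====
-- the for-loop of A as explicit recursion over the remaining characters; `result` is the
-- string built so far (as its character list; the final String.ofList is `return result`)
def alchemAGo (result : List Char) : List Char → List Char
  | [] => result
  | c :: rest =>
    if result.length == 0 then
      alchemAGo (result ++ [c]) rest
    else
      -- result[-1]; the branch guarantees result ≠ [], the .getD only makes the port total
      let t := (PySem.List.pyGet? result (-1)).getD c
      if ((PySem.Chars.isupper t && PySem.Chars.islower c) ||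
          (PySem.Chars.islower t && PySem.Chars.isupper c)) &&
         (PySem.Chars.lowerChar t == PySem.Chars.lowerChar c) then
        alchemAGo result.dropLast rest
      else
        alchemAGo (result ++ [c]) rest

def alchemReduction (polymers : String) : String :=
  String.ofList (alchemAGo [] polymers.toList)

-- ===== PORT B =====
-- 'left[i-1] != right[j] and left[i-1].lower() == right[j].lower()' (the .getD defaults
-- are never read: the loop guards 0 < i and j < |right|)
def bReact (a b : Char) : Bool :=
  a != b && (PySem.Chars.lowerChar a == PySem.Chars.lowerChar b)

-- B's boundary `while` loop over the indices i, j, then `left[:i] + right[j:]`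
def bMergeGo (left right : List Char) : Nat → Nat → List Char
  | i, j =>
    if h : 0 < i ∧ j < right.length ∧
        bReact (left.getD (i - 1) ' ') (right.getD j ' ') = true then
      bMergeGo left right (i - 1) (j + 1)
    else
      left.take i ++ right.drop j
termination_by i _ => i
decreasing_by omega

-- B's recursive `reduce`: halves reduced independently, joined by the boundary loop
def bReduce (s : List Char) : List Char :=
  if h : s.length ≤ 1 then s
  else
    let left := bReduce (s.take (s.length / 2))
    let right := bReduce (s.drop (s.length / 2))
    bMergeGo left right left.length 0
termination_by s.length
decreasing_by
  · simp only [List.length_take]; omega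
  · simp only [List.length_drop]; omega

def alchemReduction_alt (polymers : String) : String :=
  String.ofList (bReduce polymers.toList)

-- ===== PRECONDITION & SPEC =====
def Spec_alchemReduction (polymers : String) (out : String) : Prop := out = alchemReduction_alt polymers
instance (polymers : String) (out : String) : Decidable (Spec_alchemReduction polymers out) := by unfold Spec_alchemReduction; infer_instance

-- ===== CLAIM (what is proved, stated in full; the proofs are below) =====
def Claim_equal_alchemReduction : Prop := ∀ (polymers : String), Dom_alchemReduction polymers → Spec_alchemReduction polymers (alchemReduction polymers)

-- ===== LEMMAS AND PROOFS =====

-- the common reference: insert one character in front of a reduced list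
def pvIns (c : Char) : List Char → List Char
  | [] => [c]
  | d :: r => if bReact c d then r else c :: d :: r

def pvNorm (l : List Char) : List Char := l.foldr pvIns []

-- 'irreducible': no two adjacent characters react
def pvIrr : List Char → Prop
  | a :: b :: r => bReact a b = false ∧ pvIrr (b :: r)
  | _ => True

theorem pvIrr_tail {a : Char} {l : List Char} (h : pvIrr (a :: l)) : pvIrr l := by
  cases l with
  | nil => trivial
  | cons b t => exact h.2

theorem pvIrr_prefix {l1 l2 : List Char} (h : pvIrr (l1 ++ l2)) : pvIrr l1 := by
  induction l1 with
  | nil => trivial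
  | cons a t ih =>
    cases t with
    | nil => trivial
    | cons b t' =>
      obtain ⟨h1, h2⟩ := h
      exact ⟨h1, ih h2⟩

theorem pvIrr_take {L : List Char} (hL : pvIrr L) (i : Nat) : pvIrr (L.take i) :=
  pvIrr_prefix (l2 := L.drop i) (by rw [List.take_append_drop]; exact hL)

theorem pvIrr_concat {l : List Char} {c : Char} (h : pvIrr l)
    (hb : ∀ x ∈ l.getLast?, bReact x c = false) : pvIrr (l ++ [c]) := by
  induction l with
  | nil => trivial
  | cons a t ih =>
    cases t with
    | nil => exact ⟨hb a (by simp), trivial⟩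
    | cons b t' =>
      refine ⟨h.1, ih h.2 ?_⟩
      intro x hx
      exact hb x (by simpa [List.getLast?_cons_cons] using hx)

theorem up_iff (a : Char) : PySem.Chars.isupper a = true ↔ (65 ≤ a.toNat ∧ a.toNat ≤ 90) := by
  simp only [PySem.Chars.isupper, Bool.and_eq_true, decide_eq_true_eq, Char.le_def]
  exact Iff.rfl

theorem lo_iff (a : Char) : PySem.Chars.islower a = true ↔ (97 ≤ a.toNat ∧ a.toNat ≤ 122) := by
  simp only [PySem.Chars.islower, Bool.and_eq_true, decide_eq_true_eq, Char.le_def]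
  exact Iff.rfl

theorem lower_toNat (a : Char) :
    (PySem.Chars.lowerChar a).toNat = if PySem.Chars.isupper a then a.toNat + 32 else a.toNat := by
  by_cases h : PySem.Chars.isupper a = true
  · have hb := (up_iff a).mp h
    have hv : Nat.isValidChar (a.toNat + 32) := Or.inl (by omega)
    simp [PySem.Chars.lowerChar, h, Char.toNat_ofNat, hv]
  · simp [PySem.Chars.lowerChar, h]

theorem char_toNat_inj {a b : Char} (h : a.toNat = b.toNat) : a = b :=
  Char.ext (UInt32.toNat_inj.mp h)

-- A's case-split cancellation condition coincides with B's 'different char, same lowering'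
theorem cond_eq (t c : Char) :
    (((PySem.Chars.isupper t && PySem.Chars.islower c) ||
      (PySem.Chars.islower t && PySem.Chars.isupper c)) &&
     (PySem.Chars.lowerChar t == PySem.Chars.lowerChar c)) = bReact t c := by
  rw [Bool.eq_iff_iff]
  simp only [bReact, Bool.and_eq_true, Bool.or_eq_true, bne_iff_ne, beq_iff_eq, up_iff, lo_iff, ne_eq]
  constructor
  · rintro ⟨hcase, hl⟩
    refine ⟨fun heq => ?_, hl⟩
    subst heq
    rcases hcase with ⟨h1, h2⟩ | ⟨h1, h2⟩ <;> omega
  · rintro ⟨hne, hl⟩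
    refine ⟨?_, hl⟩
    have hl' := congrArg Char.toNat hl
    rw [lower_toNat, lower_toNat] at hl'
    have hne' : t.toNat ≠ c.toNat := fun h => hne (char_toNat_inj h)
    by_cases h1 : PySem.Chars.isupper t = true <;> by_cases h2 : PySem.Chars.isupper c = true
    · rw [if_pos h1, if_pos h2] at hl'
      have h1n := (up_iff t).mp h1; have h2n := (up_iff c).mp h2
      omega
    · rw [if_pos h1, if_neg h2] at hl'
      have h1n := (up_iff t).mp h1
      have h2n : ¬(65 ≤ c.toNat ∧ c.toNat ≤ 90) := fun hh => h2 ((up_iff c).mpr hh)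
      omega
    · rw [if_neg h1, if_pos h2] at hl'
      have h2n := (up_iff c).mp h2
      have h1n : ¬(65 ≤ t.toNat ∧ t.toNat ≤ 90) := fun hh => h1 ((up_iff t).mpr hh)
      omega
    · rw [if_neg h1, if_neg h2] at hl'
      omega

-- uppercase trichotomy packaged for omega
theorem up_cases (a : Char) :
    (65 ≤ a.toNat ∧ a.toNat ≤ 90 ∧ (PySem.Chars.lowerChar a).toNat = a.toNat + 32) ∨
    (¬(65 ≤ a.toNat ∧ a.toNat ≤ 90) ∧ (PySem.Chars.lowerChar a).toNat = a.toNat) := by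
  by_cases h : PySem.Chars.isupper a = true
  · exact Or.inl ⟨((up_iff a).mp h).1, ((up_iff a).mp h).2, by rw [lower_toNat, if_pos h]⟩
  · exact Or.inr ⟨fun hb => h ((up_iff a).mpr hb), by rw [lower_toNat, if_neg h]⟩

-- a character reacts with at most one character
theorem react_unique {y c d : Char} (h1 : bReact y c = true) (h2 : bReact c d = true) : y = d := by
  simp only [bReact, Bool.and_eq_true, bne_iff_ne, beq_iff_eq, ne_eq] at h1 h2
  obtain ⟨hyc, hl1⟩ := h1
  obtain ⟨hcd, hl2⟩ := h2
  have e1 := congrArg Char.toNat hl1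
  have e2 := congrArg Char.toNat hl2
  have nyc : y.toNat ≠ c.toNat := fun h => hyc (char_toNat_inj h)
  have ncd : c.toNat ≠ d.toNat := fun h => hcd (char_toNat_inj h)
  apply char_toNat_inj
  rcases up_cases y with ⟨uy1, uy2, uy3⟩ | ⟨uy1, uy3⟩ <;>
    rcases up_cases c with ⟨uc1, uc2, uc3⟩ | ⟨uc1, uc3⟩ <;>
      rcases up_cases d with ⟨ud1, ud2, ud3⟩ | ⟨ud1, ud3⟩ <;>
        rw [uy3, uc3] at e1 <;> rw [uc3, ud3] at e2 <;> omega

theorem irr_ins {r : List Char} (c : Char) (h : pvIrr r) : pvIrr (pvIns c r) := by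
  cases r with
  | nil => trivial
  | cons d r' =>
    by_cases hr : bReact c d = true
    · simp only [pvIns, hr, if_pos]
      exact pvIrr_tail h
    · have hf : bReact c d = false := Bool.eq_false_iff.mpr hr
      simp only [pvIns, hf, Bool.false_eq_true, if_false]
      exact ⟨hf, h⟩

theorem irr_foldr_ins {R : List Char} (hR : pvIrr R) (l : List Char) :
    pvIrr (l.foldr pvIns R) := by
  induction l with
  | nil => exact hR
  | cons c l ih => exact irr_ins c ih

theorem irr_norm (l : List Char) : pvIrr (pvNorm l) := irr_foldr_ins (show pvIrr [] from trivial) l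

theorem norm_of_irr {l : List Char} (h : pvIrr l) : pvNorm l = l := by
  induction l with
  | nil => rfl
  | cons c l ih =>
    have : pvNorm (c :: l) = pvIns c (pvNorm l) := rfl
    rw [this, ih (pvIrr_tail h)]
    cases l with
    | nil => rfl
    | cons d l' => simp [pvIns, h.1]

-- the cancellation of pvIns is undone by re-inserting the unique reacting partner
theorem ins_ins {y c : Char} {R : List Char} (hyc : bReact y c = true) (hR : pvIrr R) :
    pvIns y (pvIns c R) = R := by
  cases R with
  | nil => simp [pvIns, hyc]
  | cons d R'' =>
    by_cases hcd : bReact c d = true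
    · have hyd : y = d := react_unique hyc hcd
      subst hyd
      simp only [pvIns, hcd, if_pos]
      cases R'' with
      | nil => rfl
      | cons e R3 => simp [hR.1]
    · simp [pvIns, hcd, hyc]

-- inserting the normal form is inserting the list itself ('order does not matter')
theorem foldr_ins_norm (l : List Char) (R : List Char) (hR : pvIrr R) :
    (pvNorm l).foldr pvIns R = l.foldr pvIns R := by
  induction l with
  | nil => rfl
  | cons c l ih =>
    have key : ∀ m : List Char, (pvIns c m).foldr pvIns R = pvIns c (m.foldr pvIns R) := by
      intro m
      cases m with
      | nil => rfl
      | cons d m' =>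
        by_cases hcd : bReact c d = true
        · simp only [pvIns, hcd, if_pos, List.foldr_cons]
          exact (ins_ins hcd (irr_foldr_ins hR m')).symm
        · simp [pvIns, hcd]
    show ((pvNorm (c :: l)).foldr pvIns R) = pvIns c (l.foldr pvIns R)
    have : pvNorm (c :: l) = pvIns c (pvNorm l) := rfl
    rw [this, key, ih]

-- completing with push-only steps: an irreducible prefix with a non-reacting boundary just appends
theorem foldr_ins_append {P R : List Char} (hP : pvIrr P)
    (hb : ∀ x ∈ P.getLast?, ∀ z ∈ R.head?, bReact x z = false) :
    P.foldr pvIns R = P ++ R := by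
  induction P with
  | nil => rfl
  | cons p P' ih =>
    cases P' with
    | nil =>
      cases R with
      | nil => rfl
      | cons e R' =>
        have hpe : bReact p e = false := hb p (by simp) e (by simp)
        simp [pvIns, hpe]
    | cons q P'' =>
      have hih : (q :: P'').foldr pvIns R = (q :: P'') ++ R := by
        refine ih (pvIrr_tail hP) ?_
        intro x hx z hz
        exact hb x (by simpa [List.getLast?_cons_cons] using hx) z hz
      simp only [List.foldr_cons] at hih ⊢
      rw [hih]
      simp [pvIns, hP.1]

-- ===== A side: the loop is the stack fold, and the stack fold computes pvNorm =====

-- A's stack step (pop on react, else push)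
def pvAStep (stack : List Char) (c : Char) : List Char :=
  match stack.getLast? with
  | some t => if bReact t c then stack.dropLast else stack ++ [c]
  | none => stack ++ [c]

theorem irr_astep {st : List Char} (c : Char) (h : pvIrr st) : pvIrr (pvAStep st c) := by
  rcases List.eq_nil_or_concat' st with rfl | ⟨ys, y, rfl⟩
  · trivial
  · simp only [pvAStep, List.getLast?_concat]
    by_cases hr : bReact y c = true
    · simp only [hr, if_pos, List.dropLast_concat]
      exact pvIrr_prefix h
    · rw [if_neg (by simp [hr])]
      refine pvIrr_concat h ?_
      intro x hx
      simp only [List.getLast?_concat, Option.mem_def, Option.some.injEq] at hx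
      subst hx
      exact Bool.eq_false_iff.mpr hr

theorem step_eq (result : List Char) (c : Char) :
    (if result.length == 0 then result ++ [c]
     else
       let t := (PySem.List.pyGet? result (-1)).getD c
       if ((PySem.Chars.isupper t && PySem.Chars.islower c) ||
           (PySem.Chars.islower t && PySem.Chars.isupper c)) &&
          (PySem.Chars.lowerChar t == PySem.Chars.lowerChar c) then
         result.dropLast
       else result ++ [c]) = pvAStep result c := by
  rcases List.eq_nil_or_concat' result with rfl | ⟨ys, y, rfl⟩
  · simp [pvAStep]
  · have hget : PySem.List.pyGet? (ys ++ [y]) (-1) = some y := by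
      simp [PySem.List.pyGet?, PySem.List.pyIdx?]
    simp only [pvAStep, List.getLast?_concat, List.length_append, List.length_cons,
      List.length_nil, hget, Option.getD_some]
    rw [if_neg (by simp), cond_eq]

theorem go_eq (rest : List Char) (result : List Char) :
    alchemAGo result rest = rest.foldl pvAStep result := by
  induction rest generalizing result with
  | nil => rfl
  | cons c rest ih =>
    have h := step_eq result c
    simp only [alchemAGo, List.foldl_cons]
    split_ifs at h ⊢ <;> rw [ih] <;> simp_all

theorem foldl_astep_norm (l : List Char) (st : List Char) (hst : pvIrr st) :
    l.foldl pvAStep st = st.foldr pvIns (pvNorm l) := by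
  induction l generalizing st with
  | nil => exact (norm_of_irr hst).symm
  | cons c l ih =>
    rw [List.foldl_cons, ih _ (irr_astep c hst)]
    have hstep : (pvAStep st c).foldr pvIns (pvNorm l) = (st ++ [c]).foldr pvIns (pvNorm l) := by
      rcases List.eq_nil_or_concat' st with rfl | ⟨ys, y, rfl⟩
      · simp [pvAStep]
      · simp only [pvAStep, List.getLast?_concat]
        by_cases hr : bReact y c = true
        · simp only [hr, if_pos, List.dropLast_concat, List.append_assoc, List.foldr_append,
            List.cons_append, List.nil_append, List.foldr_cons, List.foldr_nil]
          rw [ins_ins hr (irr_norm l)]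
        · simp [hr]
    rw [hstep, List.foldr_append]
    rfl

theorem a_is_norm (l : List Char) : alchemAGo [] l = pvNorm l := by
  rw [go_eq, foldl_astep_norm l [] (show pvIrr [] from trivial)]
  rfl

-- ===== B side: the boundary loop completes a foldr pvIns, and bReduce computes pvNorm =====

theorem merge_go_eq (L R : List Char) (hL : pvIrr L) :
    ∀ i j, i ≤ L.length → j ≤ R.length →
      bMergeGo L R i j = (L.take i).foldr pvIns (R.drop j) := by
  intro i
  induction i using Nat.strong_induction_on with
  | _ i ih =>
    intro j hi hj
    rw [bMergeGo]
    split_ifs with h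
    · obtain ⟨h0, hjR, hr⟩ := h
      have hLg : L.getD (i - 1) ' ' = L[i - 1]'(by omega) := List.getD_eq_getElem L ' ' (by omega)
      have hRg : R.getD j ' ' = R[j]'(by omega) := List.getD_eq_getElem R ' ' (by omega)
      rw [ih (i - 1) (by omega) (j + 1) (by omega) (by omega)]
      have htake : L.take i = L.take (i - 1) ++ [L[i - 1]'(by omega)] := by
        have := List.take_add_one (l := L) (i := i - 1)
        rw [Nat.sub_add_cancel h0] at this
        rw [this, List.getElem?_eq_getElem (by omega)]
        simp
      have hdrop : R.drop j = R[j]'(by omega) :: R.drop (j + 1) :=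
        List.drop_eq_getElem_cons (by omega)
      rw [htake, List.foldr_append, hdrop]
      simp only [List.foldr_cons, List.foldr_nil]
      rw [hLg, hRg] at hr
      simp only [pvIns, hr, if_pos]
    · -- the loop has stopped: only non-reacting boundary (or nothing) remains, so it appends
      rw [foldr_ins_append (pvIrr_take hL i)]
      intro x hx z hz
      by_cases h0 : 0 < i
      · by_cases hjR : j < R.length
        · have hr : bReact (L.getD (i - 1) ' ') (R.getD j ' ') = false := by
            rcases Bool.eq_false_or_eq_true (bReact (L.getD (i - 1) ' ') (R.getD j ' ')) with hh | hh
            · exact absurd ⟨h0, hjR, hh⟩ h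
            · exact hh
          have hLg : L.getD (i - 1) ' ' = L[i - 1]'(by omega) := List.getD_eq_getElem L ' ' (by omega)
          have hRg : R.getD j ' ' = R[j]'(by omega) := List.getD_eq_getElem R ' ' (by omega)
          have htake : L.take i = L.take (i - 1) ++ [L[i - 1]'(by omega)] := by
            have := List.take_add_one (l := L) (i := i - 1)
            rw [Nat.sub_add_cancel h0] at this
            rw [this, List.getElem?_eq_getElem (by omega)]
            simp
          have hxval : x = L[i - 1]'(by omega) := by
            rw [htake, List.getLast?_concat] at hx
            have hx' : L[i - 1]'(by omega) = x := by simpa using hx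
            exact hx'.symm
          have hzval : z = R[j]'(by omega) := by
            rw [List.drop_eq_getElem_cons (by omega), List.head?_cons] at hz
            have hz' : R[j]'(by omega) = z := by simpa using hz
            exact hz'.symm
          rw [hxval, hzval, ← hLg, ← hRg]
          exact hr
        · rw [List.drop_eq_nil_iff.mpr (by omega), List.head?_nil] at hz
          exact absurd hz (by simp)
      · rw [List.take_eq_nil_iff.mpr (by omega), List.getLast?_nil] at hx
        exact absurd hx (by simp)

theorem bReduce_norm (s : List Char) : bReduce s = pvNorm s := by
  induction s using bReduce.induct with
  | case1 s h =>
    rw [bReduce, dif_pos h]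
    match s, h with
    | [], _ => rfl
    | [c], _ => rfl
  | case2 s h ih1 ih2 =>
    rw [bReduce, dif_neg h]
    simp only
    rw [ih1, ih2]
    have hirrR : pvIrr (pvNorm (s.drop (s.length / 2))) := irr_norm _
    rw [merge_go_eq _ _ (irr_norm _) _ 0 le_rfl (by omega),
      List.take_length, List.drop_zero,
      foldr_ins_norm _ _ hirrR]
    have hsplit : pvNorm s =
        (s.take (s.length / 2)).foldr pvIns (pvNorm (s.drop (s.length / 2))) := by
      conv_lhs => rw [pvNorm, ← List.take_append_drop (s.length / 2) s, List.foldr_append]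
      rfl
    rw [hsplit]

-- ===== VERDICT (by name: the statement is the Claim_ definition above) =====
theorem alchemReduction_spec : Claim_equal_alchemReduction := by
  intro p _
  unfold Spec_alchemReduction alchemReduction alchemReduction_alt
  rw [a_is_norm, bReduce_norm]
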